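-- pv_equiv track=rewrite | github.com/ntnquang2906/Invoice_broker_breakdown | broker-extraction-api/app/utils.py | get_currency
-- ===== SOURCE A (Python) =====
-- currencies = [
--     "AED", "AFN", "ALL", "AMD", "ANG", "AOA", "ARS", "AUD", "AWG", "AZN",
--     "BAM", "BBD", "BDT", "BGN", "BHD", "BIF", "BMD", "BND", "BOB", "BRL",
--     "BSD", "BTN", "BWP", "BYN", "BZD",
--     "CAD", "CDF", "CHF", "CLP", "CNY", "COP", "CRC", "CUP", "CVE", "CZK",
--     "DJF", "DKK", "DOP", "DZD",
--     "EGP", "ERN", "ETB", "EUR",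
--     "FJD", "FKP",
--     "GBP", "GEL", "GHS", "GIP", "GMD", "GNF", "GTQ", "GYD",
--     "HKD", "HNL", "HRK", "HTG", "HUF",
--     "IDR", "ILS", "INR", "IQD", "IRR", "ISK",
--     "JMD", "JOD", "JPY",
--     "KES", "KGS", "KHR", "KMF", "KPW", "KRW", "KWD", "KYD", "KZT",
--     "LAK", "LBP", "LKR", "LRD", "LSL", "LYD",
--     "MAD", "MDL", "MGA", "MKD", "MMK", "MNT", "MOP", "MRU", "MUR", "MVR", "MWK", "MXN", "MYR", "MZN",
--     "NAD", "NGN", "NIO", "NOK", "NPR", "NZD",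
--     "OMR",
--     "PAB", "PEN", "PGK", "PHP", "PKR", "PLN", "PYG",
--     "QAR",
--     "RON", "RSD", "RUB", "RWF",
--     "SAR", "SBD", "SCR", "SDG", "SEK", "SGD", "SHP", "SLL", "SOS", "SRD", "SSP", "STN", "SVC", "SYP", "SZL",
--     "THB", "TJS", "TMT", "TND", "TOP", "TRY", "TTD", "TWD", "TZS",
--     "UAH", "UGX", "USD", "UYU", "UZS",
--     "VES", "VND", "VUV",
--     "WST",
--     "XAF", "XCD", "XOF", "XPF",
--     "YER",
--     "ZAR", "ZMW", "ZWL"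
-- ]
--
-- def get_currency(row_json):
--     text = " ".join(
--         row_json.get("Transaction Tax", [])
--         + row_json.get("Cost/Purchase price", [])
--         + row_json.get("Transaction value", [])
--     )
--     for e in currencies:
--         if e in text:
--             return e
--     return ""
-- ===== SOURCE B (Python) =====
-- # Every currency code is exactly 3 characters, so a code occurs in the joined
-- # text iff it equals some 3-character window of it.  B keeps the codes in one
-- # whitespace-separated string, builds a code->index map once, and makes a
-- # single pass over the windows keeping the running minimum code index.
-- _codes_str = (
--     "AED AFN ALL AMD ANG AOA ARS AUD AWG AZN "
--     "BAM BBD BDT BGN BHD BIF BMD BND BOB BRL BSD BTN BWP BYN BZD "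
--     "CAD CDF CHF CLP CNY COP CRC CUP CVE CZK "
--     "DJF DKK DOP DZD "
--     "EGP ERN ETB EUR "
--     "FJD FKP "
--     "GBP GEL GHS GIP GMD GNF GTQ GYD "
--     "HKD HNL HRK HTG HUF "
--     "IDR ILS INR IQD IRR ISK "
--     "JMD JOD JPY "
--     "KES KGS KHR KMF KPW KRW KWD KYD KZT "
--     "LAK LBP LKR LRD LSL LYD "
--     "MAD MDL MGA MKD MMK MNT MOP MRU MUR MVR MWK MXN MYR MZN "
--     "NAD NGN NIO NOK NPR NZD "
--     "OMR "
--     "PAB PEN PGK PHP PKR PLN PYG "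
--     "QAR "
--     "RON RSD RUB RWF "
--     "SAR SBD SCR SDG SEK SGD SHP SLL SOS SRD SSP STN SVC SYP SZL "
--     "THB TJS TMT TND TOP TRY TTD TWD TZS "
--     "UAH UGX USD UYU UZS "
--     "VES VND VUV "
--     "WST "
--     "XAF XCD XOF XPF "
--     "YER "
--     "ZAR ZMW ZWL"
-- )
-- _codes = _codes_str.split()
-- _code_index = {c: i for i, c in enumerate(_codes)}
--
--
-- def get_currency(row_json):
--     parts = []
--     for key in ("Transaction Tax", "Cost/Purchase price", "Transaction value"):
--         parts.extend(row_json.get(key, []))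
--     text = " ".join(parts)
--     best = None
--     for i in range(len(text) - 2):
--         j = _code_index.get(text[i:i + 3])
--         if j is not None and (best is None or j < best):
--             best = j
--     return _codes[best] if best is not None else ""
-- ===== Notes on version B (the rewrite author's own statement) =====
-- stated objective: alternative
-- what changed: Instead of scanning the whole text once per currency code, B keeps the codes in one whitespace-separated string split once at import, builds a code->index map, and makes a single running-minimum pass over the 3-character windows of the text (valid because every code is exactly 3 characters), returning the code with the smallest list index matched.
import Mathlib
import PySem

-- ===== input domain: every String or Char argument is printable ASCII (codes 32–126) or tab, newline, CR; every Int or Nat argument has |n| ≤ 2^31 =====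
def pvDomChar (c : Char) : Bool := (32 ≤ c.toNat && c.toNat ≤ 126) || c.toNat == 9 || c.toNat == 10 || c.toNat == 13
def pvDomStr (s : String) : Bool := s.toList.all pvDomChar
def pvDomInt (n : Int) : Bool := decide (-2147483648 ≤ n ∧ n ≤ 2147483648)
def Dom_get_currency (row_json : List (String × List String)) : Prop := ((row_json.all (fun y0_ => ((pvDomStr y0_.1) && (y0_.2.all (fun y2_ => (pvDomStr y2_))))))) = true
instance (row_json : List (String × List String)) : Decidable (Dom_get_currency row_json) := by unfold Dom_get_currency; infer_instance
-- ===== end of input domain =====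

-- B replaces A's per-code substring scan of the text with a single running-minimum pass over the
-- text's 3-character windows and a precomputed code→index map (objective: alternative; every code is 3 chars).

-- ===== PORT A =====
def currencies : List String := ["AED","AFN","ALL","AMD","ANG","AOA","ARS","AUD","AWG","AZN","BAM","BBD","BDT","BGN","BHD","BIF","BMD","BND","BOB","BRL","BSD","BTN","BWP","BYN","BZD","CAD","CDF","CHF","CLP","CNY","COP","CRC","CUP","CVE","CZK","DJF","DKK","DOP","DZD","EGP","ERN","ETB","EUR","FJD","FKP","GBP","GEL","GHS","GIP","GMD","GNF","GTQ","GYD","HKD","HNL","HRK","HTG","HUF","IDR","ILS","INR","IQD","IRR","ISK","JMD","JOD","JPY","KES","KGS","KHR","KMF","KPW","KRW","KWD","KYD","KZT","LAK","LBP","LKR","LRD","LSL","LYD","MAD","MDL","MGA","MKD","MMK","MNT","MOP","MRU","MUR","MVR","MWK","MXN","MYR","MZN","NAD","NGN","NIO","NOK","NPR","NZD","OMR","PAB","PEN","PGK","PHP","PKR","PLN","PYG","QAR","RON","RSD","RUB","RWF","SAR","SBD","SCR","SDG","SEK","SGD","SHP","SLL","SOS","SRD","SSP","STN","SVC","SY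P","SZL","THB","TJS","TMT","TND","TOP","TRY","TTD","TWD","TZS","UAH","UGX","USD","UYU","UZS","VES","VND","VUV","WST","XAF","XCD","XOF","XPF","YER","ZAR","ZMW","ZWL"]

-- A's 'for e in currencies: if e in text: return e' / 'return ""'
def getCurrencyLoop (text : String) : List String → String
  | [] => ""
  | e :: rest => if PySem.Str.isIn e text then e else getCurrencyLoop text rest

def get_currency (row_json : List (String × List String)) : String :=
  let d : PySem.Dict String (List String) := ⟨row_json⟩
  let text := PySem.Str.join " " (d.getD "Transaction Tax" [] ++ d.getD "Cost/Purchase price" [] ++ d.getD "Transaction value" [])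
  getCurrencyLoop text currencies

-- ===== PORT B =====
-- _codes_str (one whitespace-separated constant), _codes = _codes_str.split()
def codesStr : String := "AED AFN ALL AMD ANG AOA ARS AUD AWG AZN BAM BBD BDT BGN BHD BIF BMD BND BOB BRL BSD BTN BWP BYN BZD CAD CDF CHF CLP CNY COP CRC CUP CVE CZK DJF DKK DOP DZD EGP ERN ETB EUR FJD FKP GBP GEL GHS GIP GMD GNF GTQ GYD HKD HNL HRK HTG HUF IDR ILS INR IQD IRR ISK JMD JOD JPY KES KGS KHR KMF KPW KRW KWD KYD KZT LAK LBP LKR LRD LSL LYD MAD MDL MGA MKD MMK MNT MOP MRU MUR MVR MWK MXN MYR MZN NAD NGN NIO NOK NPR NZD OMR PAB PEN PGK PHP PKR PLN PYG QAR RON RSD RUB RWF SAR SBD SCR SDG SEK SGD SHP SLL SOS SRD SSP STN SVC SYP SZL THB TJS TMT TND TOP TRY TTD TWD TZS UAH UGX USD UYU UZS VES VND VUV WST XAF XCD XOF XPF YER ZAR ZMW ZWL"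

def codes : List String := PySem.Str.split₀ codesStr

-- _code_index = {c: i for i, c in enumerate(_codes)}
def codeIndex : PySem.Dict String Int :=
  (PySem.List.enumerate codes).foldl (fun d p => d.insert p.2 p.1) PySem.Dict.empty

def get_currency_alt (row_json : List (String × List String)) : String :=
  let d : PySem.Dict String (List String) := ⟨row_json⟩
  -- parts = []; for key in (…): parts.extend(row_json.get(key, []))
  let parts := ["Transaction Tax", "Cost/Purchase price", "Transaction value"].foldl
      (fun acc k => acc ++ d.getD k []) []
  let text := PySem.Str.join " " parts
  -- best = None; for i in range(len(text)-2): j = _code_index.get(text[i:i+3]); if j is not None and (best is None or j < best): best = j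
  let best := (PySem.List.pyRange 0 (PySem.Str.len text - 2)).foldl
      (fun best i =>
        match codeIndex.get? (PySem.Str.slice text (some i) (some (i + 3))) with
        | none => best
        | some j =>
          match best with
          | none => some j
          | some b => if j < b then some j else best) (none : Option Int)
  -- return _codes[best] if best is not None else ""  (the index is provably in range, so .getD "" is exact)
  match best with
  | some m => (PySem.List.pyGet? codes m).getD ""
  | none => ""

-- ===== PRECONDITION & SPEC =====
def Spec_get_currency (row_json : List (String × List String)) (out : String) : Prop := out = get_currency_alt row_json
instance (row_json : List (String × List String)) (out : String) : Decidable (Spec_get_currency row_json out) := by unfold Spec_get_currency; infer_instance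

-- ===== CLAIM (what is proved, stated in full; the proofs are below) =====
def Claim_equal_get_currency : Prop := ∀ (row_json : List (String × List String)), Dom_get_currency row_json → Spec_get_currency row_json (get_currency row_json)

-- ===== LEMMAS AND PROOFS =====

set_option maxRecDepth 100000 in
set_option maxHeartbeats 2000000 in
theorem codes_eq : codes = currencies := by decide

theorem loop_eq (text : String) (l : List String) :
    getCurrencyLoop text l =
      (match l.find? (fun e => PySem.Str.isIn e text) with | some e => e | none => "") := by
  induction l with
  | nil => rfl
  | cons e rest ih =>
    rw [getCurrencyLoop, List.find?]
    cases h : PySem.Str.isIn e text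
    · rw [if_neg (by simp), ih]
    · rw [if_pos (by simp)]

set_option maxRecDepth 100000 in
set_option maxHeartbeats 2000000 in
theorem ci_items : codeIndex.items = (PySem.List.enumerate currencies).map (fun p => (p.2, p.1)) := by decide

theorem ci_keys : codeIndex.keys = currencies := by
  have h : codeIndex.keys = codeIndex.items.map Prod.fst := rfl
  rw [h, ci_items, List.map_map]
  exact PySem.List.map_snd_enumerate currencies 0

set_option maxRecDepth 100000 in
theorem currencies_nodup : currencies.Nodup := by decide

set_option maxRecDepth 100000 in
theorem currencies_len3 : ∀ s ∈ currencies, s.toList.length = 3 := by decide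

theorem ci_keys_nodup : codeIndex.keys.Nodup := by rw [ci_keys]; exact currencies_nodup

theorem ci_get?_at (n : Nat) (h : n < currencies.length) :
    codeIndex.get? currencies[n] = some (n : Int) := by
  rw [PySem.Dict.get?_eq_some_iff_mem_items _ _ _ ci_keys_nodup, ci_items]
  exact List.mem_map.mpr ⟨((n : Int), currencies[n]),
    (PySem.List.mem_enumerate_iff _ _ _).mpr ⟨n, h, by simp⟩, rfl⟩

theorem ci_get?_some (w : String) (j : Int) (h : codeIndex.get? w = some j) :
    ∃ n : Nat, ∃ hn : n < currencies.length, j = (n : Int) ∧ w = currencies[n] := by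
  rw [PySem.Dict.get?_eq_some_iff_mem_items _ _ _ ci_keys_nodup, ci_items, List.mem_map] at h
  obtain ⟨p, hp, hpe⟩ := h
  obtain ⟨n, hn, rfl⟩ := (PySem.List.mem_enumerate_iff _ _ _).mp hp
  simp only [Prod.mk.injEq] at hpe
  exact ⟨n, hn, by omega, hpe.1.symm⟩

-- a 3-character string occurs in cs iff it equals some 3-character window of cs
theorem isIn_iff_window (e cs : List Char) (he : e.length = 3) :
    PySem.Chars.isIn e cs = true ↔
      ∃ i ∈ PySem.List.pyRange 0 ((cs.length : Int) - 2), PySem.List.slice cs (some i) (some (i + 3)) = e := by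
  constructor
  · intro h
    obtain ⟨j, hj⟩ := (PySem.Chars.exists_prefix_drop_iff_isIn e cs).mpr h
    have hlen : e.length ≤ (cs.drop j).length := hj.length_le
    simp only [List.length_drop, he] at hlen
    refine ⟨(j : Int), PySem.List.mem_pyRange_one.mpr ⟨by positivity, by omega⟩, ?_⟩
    have h3 : ((j : Int) + 3) = ((j : Int) + ((3 : Nat) : Int)) := by norm_num
    rw [h3, PySem.List.slice_natCast_add]
    have := List.prefix_iff_eq_take.mp hj
    rw [he] at this
    exact this.symm
  · rintro ⟨i, hiR, hslice⟩
    obtain ⟨hi0, hiU⟩ := PySem.List.mem_pyRange_one.mp hiR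
    obtain ⟨j, rfl⟩ := Int.eq_ofNat_of_zero_le hi0
    have h3 : ((j : Int) + 3) = ((j : Int) + ((3 : Nat) : Int)) := by norm_num
    rw [h3, PySem.List.slice_natCast_add] at hslice
    refine (PySem.Chars.exists_prefix_drop_iff_isIn e cs).mp ⟨j, ?_⟩
    rw [List.prefix_iff_eq_take, he, hslice]

-- a running-minimum fold with first-wins ties IS min? of the filterMapped hit list
theorem fold_min_general (f : Int → Option Int) (l : List Int) :
    (l.foldl (fun best i =>
        match f i with
        | none => best
        | some j =>
          match best with
          | none => some j
          | some b => if j < b then some j else best) (none : Option Int)) =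
    PySem.List.min? (l.filterMap f) (fun j => j) := by
  rw [PySem.List.min?, List.foldl_filterMap]
  congr 1
  funext acc i
  cases f i with
  | none => rfl
  | some j => cases acc <;> rfl

set_option maxRecDepth 100000 in
set_option maxHeartbeats 2000000 in
theorem fold_eq_min? (text : String) :
    ((PySem.List.pyRange 0 (PySem.Str.len text - 2)).foldl
      (fun best i =>
        match codeIndex.get? (PySem.Str.slice text (some i) (some (i + 3))) with
        | none => best
        | some j =>
          match best with
          | none => some j
          | some b => if j < b then some j else best) (none : Option Int)) =
    PySem.List.min?
      ((PySem.List.pyRange 0 (PySem.Str.len text - 2)).filterMap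
        (fun i => codeIndex.get? (PySem.Str.slice text (some i) (some (i + 3))))) (fun j => j) :=
  fold_min_general (fun i => codeIndex.get? (PySem.Str.slice text (some i) (some (i + 3)))) _

-- characterisation of the hit list: j is a hit iff j is the index of a currency occurring in the text
theorem mem_hits (text : String) (j : Int) :
    (j ∈ (PySem.List.pyRange 0 (PySem.Str.len text - 2)).filterMap
        (fun i => codeIndex.get? (PySem.Str.slice text (some i) (some (i + 3))))) ↔
      ∃ n : Nat, ∃ hn : n < currencies.length, j = (n : Int) ∧ PySem.Str.isIn currencies[n] text = true := by
  rw [List.mem_filterMap]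
  constructor
  · rintro ⟨i, hiR, hget⟩
    obtain ⟨n, hn, rfl, hw⟩ := ci_get?_some _ _ hget
    refine ⟨n, hn, rfl, ?_⟩
    rw [PySem.Str.isIn_eq, isIn_iff_window _ _ (currencies_len3 _ (List.getElem_mem hn))]
    refine ⟨i, ?_, ?_⟩
    · rwa [PySem.Str.len_eq] at hiR
    · rw [← hw, PySem.Str.toList_slice]; rfl
  · rintro ⟨n, hn, rfl, hIn⟩
    rw [PySem.Str.isIn_eq, isIn_iff_window _ _ (currencies_len3 _ (List.getElem_mem hn))] at hIn
    obtain ⟨i, hiR, hslice⟩ := hIn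
    have hweq : PySem.Str.slice text (some i) (some (i + 3)) = currencies[n] := by
      apply String.toList_inj.mp
      rw [PySem.Str.toList_slice]
      exact hslice
    refine ⟨i, ?_, ?_⟩
    · rwa [PySem.Str.len_eq]
    · rw [hweq, ci_get?_at n hn]

theorem main_eq (text : String) :
    getCurrencyLoop text currencies =
      (match PySem.List.min?
          ((PySem.List.pyRange 0 (PySem.Str.len text - 2)).filterMap
            (fun i => codeIndex.get? (PySem.Str.slice text (some i) (some (i + 3))))) (fun j => j) with
       | some m => (PySem.List.pyGet? codes m).getD ""
       | none => "") := by
  rw [loop_eq, codes_eq]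
  set hits := (PySem.List.pyRange 0 (PySem.Str.len text - 2)).filterMap
      (fun i => codeIndex.get? (PySem.Str.slice text (some i) (some (i + 3)))) with hhits
  cases hmin : PySem.List.min? hits (fun j => j) with
  | none =>
    have hnil : hits = [] := (PySem.List.min?_eq_none_iff _ _).mp hmin
    have hnone : currencies.find? (fun e => PySem.Str.isIn e text) = none := by
      rw [List.find?_eq_none]
      intro e he hp
      obtain ⟨n, hn, rfl⟩ := List.mem_iff_getElem.mp he
      have hmem : ((n : Int)) ∈ hits := (mem_hits text _).mpr ⟨n, hn, rfl, hp⟩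
      rw [hnil] at hmem
      exact absurd hmem (List.not_mem_nil)
    rw [hnone]
  | some m =>
    obtain ⟨n0, hn0, rfl, hp0⟩ := (mem_hits text m).mp (PySem.List.min?_mem hmin)
    have hmin' := PySem.List.min?_isMin hmin
    set p : String → Bool := fun e => PySem.Str.isIn e text with hp
    have hp0' : p currencies[n0] = true := hp0
    set k := currencies.findIdx p with hk
    have hkl : k < currencies.length :=
      List.findIdx_lt_length.mpr ⟨currencies[n0], List.getElem_mem hn0, hp0'⟩
    have hpk : p currencies[k] = true := List.findIdx_getElem (w := hkl)
    have hkmem : ((k : Int)) ∈ hits := (mem_hits text _).mpr ⟨k, hkl, rfl, hpk⟩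
    have h1 : ((n0 : Int)) ≤ (k : Int) := hmin' _ hkmem
    have h2 : k ≤ n0 := by
      by_contra hlt
      have hfalse : p currencies[n0] = false :=
        List.not_of_lt_findIdx (p := p) (xs := currencies) (i := n0) (by omega)
      rw [hfalse] at hp0'
      exact Bool.false_ne_true hp0'
    have hkn : k = n0 := by omega
    have hfind : currencies.find? p = some currencies[n0] := by
      rw [List.find?_eq_getElem?_findIdx, ← hk, hkn, List.getElem?_eq_getElem hn0]
    rw [hfind]
    show currencies[n0] = (PySem.List.pyGet? currencies ((n0 : Nat) : Int)).getD ""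
    rw [PySem.List.pyGet?_natCast, List.getElem?_eq_getElem hn0]
    rfl

theorem parts_eq (d : PySem.Dict String (List String)) :
    (["Transaction Tax", "Cost/Purchase price", "Transaction value"].foldl
      (fun acc k => acc ++ d.getD k []) ([] : List String)) =
    d.getD "Transaction Tax" [] ++ d.getD "Cost/Purchase price" [] ++ d.getD "Transaction value" [] := by
  simp [List.foldl]

-- ===== VERDICT (by name: the statement is the Claim_ definition above) =====
theorem get_currency_spec : Claim_equal_get_currency := by
  intro row_json _
  unfold Spec_get_currency
  show get_currency row_json = get_currency_alt row_json
  unfold get_currency get_currency_alt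
  dsimp only
  rw [parts_eq, fold_eq_min?]
  exact main_eq (PySem.Str.join " " ((PySem.Dict.mk row_json).getD "Transaction Tax" [] ++
    (PySem.Dict.mk row_json).getD "Cost/Purchase price" [] ++ (PySem.Dict.mk row_json).getD "Transaction value" []))
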